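-- pv_equiv track=rewrite | github.com/565353780/siggraph-rebuttal | siggraph_rebuttal/Method/table.py | toFormatDataStr
-- ===== SOURCE A (Python) =====
-- def toFormatDataStr(data) -> str:
--     format_data_str = ''
--
--     if '\\' in data:
--         data_list = data.split('\\')
--
--         data_str = data_list[0]
--
--         outer_tag_num = 0
--         for tag in data_list[1:]:
--             if tag in ['bf', 'underline']:
--                 format_data_str += '\\' + tag + '{'
--                 outer_tag_num += 1
--     else:
--         data_str = data
--
--     format_data_str += '\\text{'
--     format_data_str += str(data_str)
--
--     if '\\' in data:
--         for _ in range(outer_tag_num):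
--             format_data_str += '}'
--
--     format_data_str += '}'
--
--     if '\\' in data:
--         for tag in data_list[1:]:
--             if tag in ['downarrow', 'uparrow']:
--                 format_data_str += '\\' + tag
--     return format_data_str
-- ===== SOURCE B (Python) =====
-- def toFormatDataStr(data) -> str:
--     if '\\' not in data:
--         return '\\text{' + str(data) + '}'
--     parts = data.split('\\')
--     tags = parts[1:]
--     inner = '\\text{' + str(parts[0]) + '}'
--     for tag in reversed([t for t in tags if t in ('bf', 'underline')]):
--         inner = '\\' + tag + '{' + inner + '}'
--     return inner + ''.join('\\' + t for t in tags if t in ('downarrow', 'uparrow'))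
-- ===== Notes on version B (the rewrite author's own statement) =====
-- stated objective: simpler
-- what changed: Replaces A's counter-plus-separate-closing-brace-loop accumulator with a fold that wraps the inner text group in the formatting tags in reversed order and appends the arrows via a join over a filtered list.
import Mathlib
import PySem

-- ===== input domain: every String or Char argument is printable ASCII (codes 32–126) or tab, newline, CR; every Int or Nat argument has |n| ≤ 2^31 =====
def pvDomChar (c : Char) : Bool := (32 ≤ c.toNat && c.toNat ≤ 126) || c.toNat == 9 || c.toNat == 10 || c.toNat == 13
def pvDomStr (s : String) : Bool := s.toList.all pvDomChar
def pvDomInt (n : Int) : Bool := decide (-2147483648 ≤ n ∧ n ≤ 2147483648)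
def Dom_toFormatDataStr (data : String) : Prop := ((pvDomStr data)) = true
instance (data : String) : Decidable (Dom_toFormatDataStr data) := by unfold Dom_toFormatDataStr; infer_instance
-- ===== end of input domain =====

-- B replaces A's tag counter and separate closing-brace loop with a reversed fold that wraps the
-- inner \text{...} and a flatMap for the arrows (objective: simpler; return value only).

-- ===== PORT A =====
-- membership test 'tag in ['bf', 'underline']' / 'tag in ['downarrow', 'uparrow']'
def pvIsWrap (t : List Char) : Bool := ["bf".toList, "underline".toList].contains t
def pvIsArrow (t : List Char) : Bool := ["downarrow".toList, "uparrow".toList].contains t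

def toFormatDataStr (data : String) : String :=
  let l := data.toList
  if PySem.Chars.isIn ['\\'] l then
    let dataList := PySem.Chars.splitOn l ['\\']
    let dataStr := dataList.headD []        -- data_list[0]; split always returns a nonempty list
    -- first loop: accumulate opening tags and count them
    let st := (dataList.drop 1).foldl
      (fun (acc : List Char × Nat) tag =>
        if pvIsWrap tag then (acc.1 ++ '\\' :: tag ++ ['{'], acc.2 + 1) else acc)
      ([], 0)
    let fmt := st.1 ++ "\\text{".toList ++ dataStr
    -- for _ in range(outer_tag_num): += '}'
    let fmt := (PySem.List.pyRange 0 (st.2 : Int) 1).foldl (fun a _ => a ++ ['}']) fmt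
    let fmt := fmt ++ ['}']
    -- arrow loop
    let fmt := (dataList.drop 1).foldl
      (fun acc tag => if pvIsArrow tag then acc ++ '\\' :: tag else acc) fmt
    String.ofList fmt
  else
    String.ofList ("\\text{".toList ++ l ++ ['}'])

-- ===== PORT B =====
def toFormatDataStr_alt (data : String) : String :=
  let l := data.toList
  if !PySem.Chars.isIn ['\\'] l then String.ofList ("\\text{".toList ++ l ++ ['}'])
  else
    let parts := PySem.Chars.splitOn l ['\\']
    let tags := parts.drop 1
    let inner := ((tags.filter pvIsWrap).reverse).foldl
      (fun inn t => '\\' :: t ++ '{' :: inn ++ ['}'])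
      ("\\text{".toList ++ parts.headD [] ++ ['}'])
    String.ofList (inner ++ (tags.filter pvIsArrow).flatMap (fun t => '\\' :: t))

-- ===== PRECONDITION & SPEC =====
def Spec_toFormatDataStr (data : String) (out : String) : Prop := out = toFormatDataStr_alt data
instance (data : String) (out : String) : Decidable (Spec_toFormatDataStr data out) := by unfold Spec_toFormatDataStr; infer_instance

-- ===== CLAIM (what is proved, stated in full; the proofs are below) =====
def Claim_equal_toFormatDataStr : Prop := ∀ (data : String), Dom_toFormatDataStr data → Spec_toFormatDataStr data (toFormatDataStr data)

-- ===== LEMMAS AND PROOFS =====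

-- B's reversed wrapping fold, characterised in A's prefix/suffix shape
theorem pv_wrap_eq (ws : List (List Char)) (core : List Char) :
    (ws.reverse).foldl (fun inn t => '\\' :: t ++ '{' :: inn ++ ['}']) (core ++ ['}'])
      = ws.flatMap (fun t => '\\' :: t ++ ['{']) ++ core ++ List.replicate ws.length '}' ++ ['}'] := by
  induction ws with
  | nil => simp
  | cons t ws ih =>
    simp only [List.reverse_cons, List.foldl_append, List.foldl_cons, List.foldl_nil, ih,
      List.flatMap_cons, List.length_cons, List.replicate_succ']
    simp

-- a loop that appends one '}' per iteration
theorem pv_brace_loop (r : List Int) (acc : List Char) :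
    r.foldl (fun a _ => a ++ ['}']) acc = acc ++ List.replicate r.length '}' := by
  induction r generalizing acc with
  | nil => simp
  | cons x r ih => simp [ih, List.replicate_succ]

-- counting loop component
theorem pv_count_loop (ws : List (List Char)) (n : Nat) :
    ws.foldl (fun (a : Nat) _ => a + 1) n = n + ws.length := by
  induction ws generalizing n with
  | nil => simp
  | cons t ws ih => simp [ih]; omega

theorem toFormatDataStr_spec_aux (data : String) :
    toFormatDataStr data = toFormatDataStr_alt data := by
  unfold toFormatDataStr toFormatDataStr_alt
  by_cases h : PySem.Chars.isIn ['\\'] data.toList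
  · simp only [h, if_true, Bool.not_true, Bool.false_eq_true, if_false]
    set parts := PySem.Chars.splitOn data.toList ['\\'] with hp
    congr 1
    rw [PySem.List.foldl_if_eq_foldl_filter (p := fun t => pvIsWrap t),
        PySem.List.foldl_prod_mk (f := fun a (t : List Char) => a ++ '\\' :: t ++ ['{'])
          (g := fun (a : Nat) _ => a + 1),
        pv_count_loop, PySem.List.foldl_if_eq_foldl_filter (p := fun t => pvIsArrow t),
        PySem.List.foldl_append_eq_flatMap, pv_brace_loop, pv_wrap_eq]
    have hb : (((parts.drop 1).filter pvIsWrap).foldl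
        (fun a (t : List Char) => a ++ '\\' :: t ++ ['{']) [])
        = ((parts.drop 1).filter pvIsWrap).flatMap (fun t => '\\' :: t ++ ['{']) := by
      have := PySem.List.foldl_append_eq_flatMap
        (g := fun (t : List Char) => '\\' :: t ++ ['{'])
        (l := (parts.drop 1).filter pvIsWrap) (acc := ([] : List Char))
      simpa using this
    rw [hb]
    simp [PySem.List.length_pyRange_one]
  · simp [h]

-- ===== VERDICT (by name: the statement is the Claim_ definition above) =====
theorem toFormatDataStr_spec : Claim_equal_toFormatDataStr := by
  intro data _
  exact toFormatDataStr_spec_aux data
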